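-- pv_equiv track=rewrite | github.com/neatbasis/SemanticNG | .github/scripts/render_transition_evidence.py | _autogen_command_semantics_match
-- ===== SOURCE A (Python) =====
-- def _extract_pr_template_commands_by_capability(template: str) -> dict[str, list[str]]:
--     commands_by_capability: dict[str, list[str]] = {}
--     current_capability: str | None = None
--     in_code_block = False
--
--     for raw_line in template.splitlines():
--         line = raw_line.strip()
--
--         if line.startswith("#### Capability: `"):
--             suffix = line[len("#### Capability: `") :]
--             cap_id = suffix.split("`", 1)[0]
--             current_capability = cap_id if cap_id else None
--             if current_capability is not None:
--                 commands_by_capability.setdefault(current_capability, [])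
--             continue
--
--         if line == "```text":
--             in_code_block = True
--             continue
--         if line == "```":
--             in_code_block = False
--             continue
--
--         if in_code_block and current_capability and line.startswith("pytest "):
--             commands_by_capability[current_capability].append(line)
--
--     return commands_by_capability
--
-- def _canonicalize_pytest_command(command: str) -> tuple[str, ...]:
--     if not command.startswith("pytest "):
--         return (command,)
--     return tuple(command.split()[1:])
--
-- def _autogen_command_semantics_match(actual_template: str, expected_template: str) -> bool:
--     actual = _extract_pr_template_commands_by_capability(actual_template)
--     expected = _extract_pr_template_commands_by_capability(expected_template)
--
--     if set(actual) != set(expected):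
--         return False
--
--     for cap_id in expected:
--         actual_tokens: list[str] = []
--         for command in actual[cap_id]:
--             actual_tokens.extend(_canonicalize_pytest_command(command))
--
--         expected_tokens: list[str] = []
--         for command in expected[cap_id]:
--             expected_tokens.extend(_canonicalize_pytest_command(command))
--
--         if tuple(actual_tokens) != tuple(expected_tokens):
--             return False
--
--     return True
-- ===== SOURCE B (Python) =====
-- _HDR = "#### Capability: `"
--
--
-- def _cap_before(lines, i):
--     # Capability governing line i: walk backwards to the nearest header line.
--     for j in range(i - 1, -1, -1):
--         if lines[j].startswith(_HDR):
--             c = lines[j][len(_HDR):].split("`", 1)[0]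
--             return c or None
--     return None
--
--
-- def _in_code_before(lines, i):
--     # Code-block state at line i: walk backwards to the nearest fence line.
--     for j in range(i - 1, -1, -1):
--         if lines[j] == "```text":
--             return True
--         if lines[j] == "```":
--             return False
--     return False
--
--
-- def _template_tokens(template):
--     lines = [ln.strip() for ln in template.splitlines()]
--     tokens = {}
--     for line in lines:
--         if line.startswith(_HDR):
--             c = line[len(_HDR):].split("`", 1)[0]
--             if c:
--                 tokens.setdefault(c, [])
--     for i, line in enumerate(lines):
--         if not line.startswith("pytest "):
--             continue
--         cap = _cap_before(lines, i)
--         if cap is None: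
--             continue
--         if _in_code_before(lines, i):
--             tokens[cap].extend(line.split()[1:])
--     return tokens
--
--
-- def _autogen_command_semantics_match(actual_template, expected_template):
--     return _template_tokens(actual_template) == _template_tokens(expected_template)
-- ===== Notes on version B (the rewrite author's own statement) =====
-- stated objective: alternative
-- what changed: B replaces A's single forward state machine (mutable current-capability / in-code-block flags) by a stateless two-stage design: stage one collects the capability keys, stage two resolves each pytest line independently by scanning backwards for its nearest governing header and fence, then the whole comparison is one dict equality instead of A's key-set check plus per-capability flatten-and-compare loop.
import Mathlib
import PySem

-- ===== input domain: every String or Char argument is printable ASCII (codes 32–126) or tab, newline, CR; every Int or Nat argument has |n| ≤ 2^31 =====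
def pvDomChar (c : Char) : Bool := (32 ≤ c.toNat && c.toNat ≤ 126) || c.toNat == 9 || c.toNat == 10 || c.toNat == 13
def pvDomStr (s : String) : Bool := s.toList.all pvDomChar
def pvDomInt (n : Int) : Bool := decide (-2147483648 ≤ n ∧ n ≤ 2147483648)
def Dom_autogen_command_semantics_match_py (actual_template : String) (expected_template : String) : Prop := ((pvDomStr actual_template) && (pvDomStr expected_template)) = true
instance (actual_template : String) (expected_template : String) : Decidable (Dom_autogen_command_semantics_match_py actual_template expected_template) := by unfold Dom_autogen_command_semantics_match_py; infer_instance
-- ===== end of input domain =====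

-- B replaces A's forward state machine by a stateless two-stage scheme: collect the capability keys,
-- then resolve each pytest line by backward scans for its governing header and fence, and compare the
-- two capability→token dicts for plain equality (alternative decomposition, not claimed faster).

-- ===== PORT A =====
-- _canonicalize_pytest_command: (command,) if it does not start with "pytest ", else tuple(command.split()[1:])
def pvCanonA (command : String) : List String :=
  if PySem.Str.startswith command "pytest " then (PySem.Str.split₀ command).drop 1 else [command]

-- cap_id = line[len("#### Capability: `"):].split("`", 1)[0]; the slice is line[18:], sep "`" ≠ ""
-- so splitMax? is never none and its result is nonempty, hence .getD [] / .headD "" are exact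
def pvCapIdA (line : String) : String :=
  ((PySem.Str.splitMax? (PySem.Str.slice line (some 18) none) "`" 1).getD []).headD ""

-- body of _extract_pr_template_commands_by_capability's loop on the already-stripped line;
-- state = (commands_by_capability, current_capability, in_code_block)
def pvStepS (st : PySem.Dict String (List String) × Option String × Bool) (line : String) :
    PySem.Dict String (List String) × Option String × Bool :=
  if PySem.Str.startswith line "#### Capability: `" then
    if pvCapIdA line = "" then (st.1, none, st.2.2)
    else (st.1.setdefault (pvCapIdA line) [], some (pvCapIdA line), st.2.2)
  else if line = "```text" then (st.1, st.2.1, true)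
  else if line = "```" then (st.1, st.2.1, false)
  else
    match st.2.1 with
    | some c =>
        if st.2.2 ∧ c ≠ "" ∧ PySem.Str.startswith line "pytest " then
          -- commands_by_capability[current_capability].append(line); the key is always present
          -- here (setdefault ran when current_capability was set), so modify's default is never used
          (st.1.modify c [] (fun v => v ++ [line]), st.2.1, st.2.2)
        else (st.1, st.2.1, st.2.2)
    | none => (st.1, st.2.1, st.2.2)

-- one iteration of the raw-line loop: line = raw_line.strip(), then the body above
def pvStepA (st : PySem.Dict String (List String) × Option String × Bool) (raw_line : String) :
    PySem.Dict String (List String) × Option String × Bool :=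
  pvStepS st (PySem.Str.strip raw_line)

def pvExtractA (template : String) : PySem.Dict String (List String) :=
  ((PySem.Str.splitlines template).foldl pvStepA (PySem.Dict.empty, none, false)).1

def autogen_command_semantics_match_py (actual_template : String) (expected_template : String) : Bool :=
  let actual := pvExtractA actual_template
  let expected := pvExtractA expected_template
  if !(PySem.Set.equal (PySem.Set.ofList actual.keys) (PySem.Set.ofList expected.keys)) then false
  else
    -- for cap_id in expected: build the two token lists by extend-loops and compare
    -- actual[cap_id] is reached only after the key-set check, so getD's default is never used
    expected.keys.all (fun cap_id =>
      ((actual.getD cap_id []).foldl (fun acc command => acc ++ pvCanonA command) []) ==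
      ((expected.getD cap_id []).foldl (fun acc command => acc ++ pvCanonA command) []))

-- ===== PORT B =====
-- capability id parsed from a header line: line[len(_HDR):].split("`", 1)[0]
def pvCapOf (line : String) : String :=
  ((PySem.Str.splitMax? (PySem.Str.slice line (some 18) none) "`" 1).getD []).headD ""

-- _cap_before: the backward for j in range(i-1,-1,-1) loop, as recursion over the reversed prefix
def pvCapBefore : List String → Option String
  | [] => none
  | l :: rest =>
    if PySem.Str.startswith l "#### Capability: `" then
      (if pvCapOf l = "" then none else some (pvCapOf l))      -- return c or None
    else pvCapBefore rest

-- _in_code_before: backward scan for the nearest fence line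
def pvInCodeBefore : List String → Bool
  | [] => false
  | l :: rest =>
    if l = "```text" then true
    else if l = "```" then false
    else pvInCodeBefore rest

-- first pass of _template_tokens: tokens.setdefault(c, []) for every nonempty header capability
def pvPass1 : List String → PySem.Dict String (List String) → PySem.Dict String (List String)
  | [], d => d
  | l :: rest, d =>
    if PySem.Str.startswith l "#### Capability: `" then
      if pvCapOf l = "" then pvPass1 rest d
      else pvPass1 rest (d.setdefault (pvCapOf l) [])
    else pvPass1 rest d

-- second pass: rev is the reversed prefix of already-seen lines (= what the two backward scans read);
-- tokens[cap].extend(line.split()[1:]) — the key is present (pass 1 saw cap's header), so the default [] is unused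
def pvPass2 : List String → List String → PySem.Dict String (List String) → PySem.Dict String (List String)
  | [], _, d => d
  | l :: rest, rev, d =>
    if PySem.Str.startswith l "pytest " then
      match pvCapBefore rev with
      | none => pvPass2 rest (l :: rev) d
      | some cap =>
        if pvInCodeBefore rev then
          pvPass2 rest (l :: rev) (d.modify cap [] (fun v => v ++ (PySem.Str.split₀ l).drop 1))
        else pvPass2 rest (l :: rev) d
    else pvPass2 rest (l :: rev) d

def pvTemplateTokens (template : String) : PySem.Dict String (List String) :=
  let lines := (PySem.Str.splitlines template).map PySem.Str.strip
  pvPass2 lines [] (pvPass1 lines PySem.Dict.empty)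

-- Python's dict ==: same size and every (key, value) of the first found in the second (order-insensitive)
def pvDictEqB (d1 d2 : PySem.Dict String (List String)) : Bool :=
  d1.size == d2.size && d1.items.all (fun p => d2.get? p.1 == some p.2)

def autogen_command_semantics_match_py_alt (actual_template : String) (expected_template : String) : Bool :=
  pvDictEqB (pvTemplateTokens actual_template) (pvTemplateTokens expected_template)

-- ===== PRECONDITION & SPEC =====
def Spec_autogen_command_semantics_match_py (actual_template : String) (expected_template : String) (out : Bool) : Prop := out = autogen_command_semantics_match_py_alt actual_template expected_template
instance (actual_template : String) (expected_template : String) (out : Bool) : Decidable (Spec_autogen_command_semantics_match_py actual_template expected_template out) := by unfold Spec_autogen_command_semantics_match_py; infer_instance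

-- ===== CLAIM (what is proved, stated in full; the proofs are below) =====
def Claim_equal_autogen_command_semantics_match_py : Prop := ∀ (actual_template : String) (expected_template : String), Dom_autogen_command_semantics_match_py actual_template expected_template → Spec_autogen_command_semantics_match_py actual_template expected_template (autogen_command_semantics_match_py actual_template expected_template)

-- ===== LEMMAS AND PROOFS =====

-- flatten a capability's command list the way A's inner loops do
def pvFlat (v : List String) : List String := v.flatMap pvCanonA

-- B's dict is A's dict with every value flattened
def pvMapF (d : PySem.Dict String (List String)) : PySem.Dict String (List String) :=
  ⟨d.items.map (fun p => (p.1, pvFlat p.2))⟩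

theorem keys_pvMapF (d : PySem.Dict String (List String)) : (pvMapF d).keys = d.keys := by
  simp [pvMapF, PySem.Dict.keys]

theorem contains_pvMapF (d : PySem.Dict String (List String)) (k : String) :
    (pvMapF d).contains k = d.contains k := by
  simp [pvMapF, PySem.Dict.contains, List.any_map, Function.comp_def]

theorem get?_pvMapF (d : PySem.Dict String (List String)) (k : String) :
    (pvMapF d).get? k = (d.get? k).map pvFlat := by
  simp [pvMapF, PySem.Dict.get?, List.find?_map, Function.comp_def, Option.map_map]

theorem getD_pvMapF (d : PySem.Dict String (List String)) (k : String) :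
    (pvMapF d).getD k [] = pvFlat (d.getD k []) := by
  rw [PySem.Dict.getD_eq_get?_getD, PySem.Dict.getD_eq_get?_getD, get?_pvMapF]
  cases d.get? k <;> simp [pvFlat]

theorem setdefault_pvMapF (d : PySem.Dict String (List String)) (k : String) :
    pvMapF (d.setdefault k []) = (pvMapF d).setdefault k [] := by
  simp only [PySem.Dict.setdefault, contains_pvMapF]
  split
  · rfl
  · simp [pvMapF, pvFlat]

theorem insert_pvMapF (d : PySem.Dict String (List String)) (k : String) (v : List String) :
    pvMapF (d.insert k v) = (pvMapF d).insert k (pvFlat v) := by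
  apply PySem.Dict.ext
  by_cases h : d.contains k = true
  · rw [show (pvMapF (d.insert k v)).items = (d.insert k v).items.map (fun p => (p.1, pvFlat p.2)) from rfl,
      PySem.Dict.items_insert_of_contains d v h,
      PySem.Dict.items_insert_of_contains (pvMapF d) (pvFlat v) (by rw [contains_pvMapF]; exact h)]
    simp only [pvMapF, List.map_map]
    apply List.map_congr_left
    intro p _
    by_cases hp : p.1 = k <;> simp [Function.comp, hp]
  · have h' : d.contains k = false := by simpa using h
    rw [show (pvMapF (d.insert k v)).items = (d.insert k v).items.map (fun p => (p.1, pvFlat p.2)) from rfl,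
      PySem.Dict.items_insert_of_not_contains d v h',
      PySem.Dict.items_insert_of_not_contains (pvMapF d) (pvFlat v) (by rw [contains_pvMapF]; exact h')]
    simp [pvMapF]

theorem modify_pvMapF (d : PySem.Dict String (List String)) (c line : String)
    (h : PySem.Str.startswith line "pytest " = true) :
    pvMapF (d.modify c [] (fun v => v ++ [line])) =
      (pvMapF d).modify c [] (fun v => v ++ (PySem.Str.split₀ line).drop 1) := by
  have h' : PySem.Chars.startswith line.toList ['p', 'y', 't', 'e', 's', 't', ' '] = true := by
    simpa using h
  simp only [PySem.Dict.modify, insert_pvMapF, getD_pvMapF]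
  congr 1
  simp [pvFlat, pvCanonA, h']

theorem nodup_keys_setdefault (d : PySem.Dict String (List String)) (k : String) (v : List String)
    (hnd : d.keys.Nodup) : (d.setdefault k v).keys.Nodup := by
  simp only [PySem.Dict.setdefault]
  split
  · exact hnd
  · rename_i h
    have hk : k ∉ d.keys := by
      intro hmem
      exact h ((PySem.Dict.contains_iff_mem_keys d k).mpr hmem)
    have : (d.keys ++ [k]).Nodup := by
      simp [List.nodup_append, hnd]
      exact fun x hx he => hk (he ▸ hx)
    simpa [PySem.Dict.keys] using this

theorem nodup_keys_insert' (d : PySem.Dict String (List String)) (k : String) (v : List String)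
    (hnd : d.keys.Nodup) : (d.insert k v).keys.Nodup := by
  by_cases h : d.contains k = true
  · rwa [PySem.Dict.keys_insert_of_contains d v h]
  · have h' : d.contains k = false := by simpa using h
    rw [PySem.Dict.keys_insert_of_not_contains d v h']
    have hk : k ∉ d.keys := by
      intro hmem
      simp [(PySem.Dict.contains_iff_mem_keys d k).mpr hmem] at h'
    simp [List.nodup_append, hnd]
    exact fun x hx he => hk (he ▸ hx)

-- A's fold keeps the key list Nodup
theorem nodup_fold_stepS (ls : List String) :
    ∀ (st : PySem.Dict String (List String) × Option String × Bool),
      st.1.keys.Nodup → ((ls.foldl pvStepS st).1).keys.Nodup := by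
  induction ls with
  | nil => intro st h; exact h
  | cons l rest ih =>
    rintro ⟨d, cap, inb⟩ h
    rw [List.foldl_cons]
    apply ih
    by_cases h1 : PySem.Str.startswith l "#### Capability: `" = true
    · by_cases h2 : pvCapIdA l = ""
      · simpa only [pvStepS, if_pos h1, if_pos h2] using h
      · simp only [pvStepS, if_pos h1, if_neg h2]
        exact nodup_keys_setdefault d _ [] h
    · by_cases h2 : l = "```text"
      · simpa only [pvStepS, if_neg h1, if_pos h2] using h
      · by_cases h3 : l = "```"
        · simpa only [pvStepS, if_neg h1, if_neg h2, if_pos h3] using h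
        · cases cap with
          | none => simpa only [pvStepS, if_neg h1, if_neg h2, if_neg h3] using h
          | some c =>
            simp only [pvStepS, if_neg h1, if_neg h2, if_neg h3]
            split_ifs with h5
            · exact nodup_keys_insert' d c _ h
            · exact h

theorem nodup_keys_extractA (t : String) : (pvExtractA t).keys.Nodup := by
  unfold pvExtractA
  rw [show (PySem.Str.splitlines t).foldl pvStepA (PySem.Dict.empty, none, false) =
      ((PySem.Str.splitlines t).map PySem.Str.strip).foldl pvStepS
        (PySem.Dict.empty, none, false) by rw [List.foldl_map]; rfl]
  exact nodup_fold_stepS _ _ (by simp [PySem.Dict.keys, PySem.Dict.empty])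

-- head character of a string from a startswith fact
theorem head_of_startswith (l p : String) (c : Char) (hp : p.toList.head? = some c)
    (h : PySem.Str.startswith l p = true) : l.toList.head? = some c := by
  have h' : p.toList <+: l.toList := (PySem.Chars.startswith_iff _ _).mp (by simpa using h)
  obtain ⟨t, e⟩ := h'
  cases hpl : p.toList with
  | nil => rw [hpl] at hp; simp at hp
  | cons a as =>
    rw [hpl] at hp e
    simp only [List.head?_cons, Option.some.injEq] at hp
    rw [← e, hp]
    rfl

-- a pytest line is never a capability header (heads 'p' vs '#')
theorem pytest_not_hdr (l : String) (h : PySem.Str.startswith l "pytest " = true) :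
    ¬ PySem.Str.startswith l "#### Capability: `" = true := by
  intro hh
  have h1 := head_of_startswith l "pytest " 'p' rfl h
  have h2 := head_of_startswith l "#### Capability: `" '#' rfl hh
  rw [h1] at h2
  simp at h2

-- a header line is never a fence line
theorem hdr_not_fence (l : String) (h : PySem.Str.startswith l "#### Capability: `" = true) :
    l ≠ "```text" ∧ l ≠ "```" := by
  constructor <;> intro he <;> subst he <;> simp [PySem.Str.startswith] at h <;> revert h <;> decide

-- pvCapBefore never returns some ""
theorem capBefore_ne_empty (rev : List String) (c : String) (h : pvCapBefore rev = some c) :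
    c ≠ "" := by
  induction rev with
  | nil => simp [pvCapBefore] at h
  | cons l rest ih =>
    by_cases h1 : PySem.Str.startswith l "#### Capability: `" = true
    · rw [show pvCapBefore (l :: rest) =
          (if pvCapOf l = "" then none else some (pvCapOf l)) by
        simp only [pvCapBefore, if_pos h1]] at h
      by_cases h2 : pvCapOf l = ""
      · rw [if_pos h2] at h; simp at h
      · rw [if_neg h2] at h
        injection h with h
        exact fun he => h2 (h.trans he)
    · rw [show pvCapBefore (l :: rest) = pvCapBefore rest by
        simp only [pvCapBefore, if_neg h1]] at h
      exact ih h

-- pvMapF commutes with the setdefault pass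
theorem pvMapF_pass1 (ls : List String) :
    ∀ d, pvMapF (pvPass1 ls d) = pvPass1 ls (pvMapF d) := by
  induction ls with
  | nil => intro d; rfl
  | cons l rest ih =>
    intro d
    unfold pvPass1
    split_ifs with h1 h2
    · exact ih d
    · rw [ih, setdefault_pvMapF]
    · exact ih d

-- modify of a present key commutes past a setdefault
theorem setdefault_modify_comm (d : PySem.Dict String (List String)) (c k : String)
    (f : List String → List String) (hc : d.contains c = true) :
    (d.modify c [] f).setdefault k [] = (d.setdefault k []).modify c [] f := by
  by_cases hk : d.contains k = true
  · rw [PySem.Dict.setdefault_of_contains _ _ hk,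
      PySem.Dict.setdefault_of_contains]
    rw [PySem.Dict.contains_modify]
    simp [hk]
  · have hk' : d.contains k = false := by simpa using hk
    have hkc : k ≠ c := by intro he; rw [he, hc] at hk'; simp at hk'
    have hmk : (d.modify c [] f).contains k = false := by
      rw [PySem.Dict.contains_modify]
      simp [hk', hkc]
    rw [PySem.Dict.setdefault_of_not_contains _ _ hmk,
      PySem.Dict.setdefault_of_not_contains _ _ hk']
    apply PySem.Dict.ext
    have hgc : (d.insert k []).getD c [] = d.getD c [] := by
      rw [PySem.Dict.getD_eq_get?_getD, PySem.Dict.getD_eq_get?_getD,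
        PySem.Dict.get?_insert_of_ne]
      exact fun he => hkc he.symm
    rw [show (d.modify c [] f) = d.insert c (f (d.getD c [])) from rfl,
      show ((d.insert k []).modify c [] f) =
        (d.insert k []).insert c (f ((d.insert k []).getD c [])) from rfl,
      hgc]
    have hmk2 : (d.insert c (f (d.getD c []))).contains k = false := by
      rw [PySem.Dict.contains_insert]
      simp [hk', hkc]
    have hck : (d.insert k []).contains c = true := by
      rw [PySem.Dict.contains_insert]
      simp [hc]
    rw [PySem.Dict.items_insert_of_not_contains _ _ hmk2,
      PySem.Dict.items_insert_of_contains _ _ hck,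
      PySem.Dict.items_insert_of_contains _ _ hc,
      PySem.Dict.items_insert_of_not_contains _ _ hk']
    simp only [List.map_append, List.map_cons, List.map_nil]
    congr 1
    simp [hkc]

-- modify of a present key commutes past the whole setdefault pass
theorem pass1_modify_comm (ls : List String) :
    ∀ (d : PySem.Dict String (List String)) (c : String) (f : List String → List String),
      d.contains c = true →
      pvPass1 ls (d.modify c [] f) = (pvPass1 ls d).modify c [] f := by
  induction ls with
  | nil => intro d c f _; rfl
  | cons l rest ih =>
    intro d c f hc
    unfold pvPass1
    split_ifs with h1 h2
    · exact ih d c f hc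
    · rw [setdefault_modify_comm d c _ f hc, ih]
      rw [PySem.Dict.contains_setdefault]
      simp [hc]
    · exact ih d c f hc

-- the main correspondence: running B's pass 2 on the keys dict equals A's fold, flattened
theorem pass2_eq (ls : List String) :
    ∀ (rev : List String) (dA : PySem.Dict String (List String)) (cap : Option String) (inb : Bool),
      cap = pvCapBefore rev → inb = pvInCodeBefore rev →
      (∀ c, cap = some c → dA.contains c = true) →
      pvPass2 ls rev (pvMapF (pvPass1 ls dA)) =
        pvMapF ((ls.foldl pvStepS (dA, cap, inb)).1) := by
  induction ls with
  | nil => intro rev dA cap inb _ _ _; rfl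
  | cons l rest ih =>
    intro rev dA cap inb hcap hinb hinv
    rw [List.foldl_cons]
    by_cases h1 : PySem.Str.startswith l "#### Capability: `" = true
    · -- header line: B's pass 2 skips it, pass 1 and A's step both setdefault (or reset)
      have hnp : ¬ PySem.Str.startswith l "pytest " = true := fun hp => pytest_not_hdr l hp h1
      have hf := hdr_not_fence l h1
      have hcb : pvCapBefore (l :: rev) =
          (if pvCapOf l = "" then none else some (pvCapOf l)) := by
        simp only [pvCapBefore, if_pos h1]
      have hicb : pvInCodeBefore (l :: rev) = pvInCodeBefore rev := by
        simp only [pvInCodeBefore, if_neg hf.1, if_neg hf.2]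
      by_cases h2 : pvCapIdA l = ""
      · have h2' : pvCapOf l = "" := h2
        rw [show pvStepS (dA, cap, inb) l = (dA, none, inb) by
          simp only [pvStepS, if_pos h1, if_pos h2]]
        rw [show pvPass1 (l :: rest) dA = pvPass1 rest dA by
          simp only [pvPass1, if_pos h1, if_pos h2']]
        rw [show pvPass2 (l :: rest) rev (pvMapF (pvPass1 rest dA)) =
            pvPass2 rest (l :: rev) (pvMapF (pvPass1 rest dA)) by
          simp only [pvPass2, if_neg hnp]]
        exact ih (l :: rev) dA none inb
          (by rw [hcb, if_pos h2']) (hinb.trans hicb.symm) (by intro c hc; simp at hc)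
      · have h2' : ¬ pvCapOf l = "" := h2
        rw [show pvStepS (dA, cap, inb) l =
            (dA.setdefault (pvCapIdA l) [], some (pvCapIdA l), inb) by
          simp only [pvStepS, if_pos h1, if_neg h2]]
        rw [show pvPass1 (l :: rest) dA = pvPass1 rest (dA.setdefault (pvCapOf l) []) by
          simp only [pvPass1, if_pos h1, if_neg h2']]
        rw [show pvPass2 (l :: rest) rev (pvMapF (pvPass1 rest (dA.setdefault (pvCapOf l) []))) =
            pvPass2 rest (l :: rev) (pvMapF (pvPass1 rest (dA.setdefault (pvCapOf l) []))) by
          simp only [pvPass2, if_neg hnp]]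
        exact ih (l :: rev) (dA.setdefault (pvCapOf l) []) (some (pvCapIdA l)) inb
          (by rw [hcb, if_neg h2']; rfl)
          (hinb.trans hicb.symm)
          (by
            intro c hc
            injection hc with hc
            rw [← hc, PySem.Dict.contains_setdefault]
            simp [show pvCapIdA l = pvCapOf l from rfl])
    · have hp1 : pvPass1 (l :: rest) dA = pvPass1 rest dA := by
        simp only [pvPass1, if_neg h1]
      have hcb : pvCapBefore (l :: rev) = pvCapBefore rev := by
        simp only [pvCapBefore, if_neg h1]
      by_cases h2 : l = "```text"
      · have hnp : ¬ PySem.Str.startswith l "pytest " = true := by subst h2; decide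
        rw [show pvStepS (dA, cap, inb) l = (dA, cap, true) by
          simp only [pvStepS, if_neg h1, if_pos h2]]
        rw [hp1]
        rw [show pvPass2 (l :: rest) rev (pvMapF (pvPass1 rest dA)) =
            pvPass2 rest (l :: rev) (pvMapF (pvPass1 rest dA)) by
          simp only [pvPass2, if_neg hnp]]
        exact ih (l :: rev) dA cap true (hcap.trans hcb.symm)
          (by simp only [pvInCodeBefore, if_pos h2]) hinv
      · by_cases h3 : l = "```"
        · have hnp : ¬ PySem.Str.startswith l "pytest " = true := by subst h3; decide
          rw [show pvStepS (dA, cap, inb) l = (dA, cap, false) by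
            simp only [pvStepS, if_neg h1, if_neg h2, if_pos h3]]
          rw [hp1]
          rw [show pvPass2 (l :: rest) rev (pvMapF (pvPass1 rest dA)) =
              pvPass2 rest (l :: rev) (pvMapF (pvPass1 rest dA)) by
            simp only [pvPass2, if_neg hnp]]
          exact ih (l :: rev) dA cap false (hcap.trans hcb.symm)
            (by simp only [pvInCodeBefore, if_neg h2, if_pos h3]) hinv
        · -- plain line
          have hicb : pvInCodeBefore (l :: rev) = pvInCodeBefore rev := by
            simp only [pvInCodeBefore, if_neg h2, if_neg h3]
          cases cap with
          | none =>
            rw [show pvStepS (dA, none, inb) l = (dA, none, inb) by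
              simp only [pvStepS, if_neg h1, if_neg h2, if_neg h3]]
            rw [hp1]
            rw [show pvPass2 (l :: rest) rev (pvMapF (pvPass1 rest dA)) =
                pvPass2 rest (l :: rev) (pvMapF (pvPass1 rest dA)) by
              by_cases hp : PySem.Str.startswith l "pytest " = true
              · simp only [pvPass2, if_pos hp, ← hcap]
              · simp only [pvPass2, if_neg hp]]
            exact ih (l :: rev) dA none inb (hcap.trans hcb.symm)
              (hinb.trans hicb.symm) hinv
          | some c =>
            have hcne : c ≠ "" := capBefore_ne_empty rev c hcap.symm
            have hcon : dA.contains c = true := hinv c rfl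
            by_cases hp : PySem.Str.startswith l "pytest " = true
            · by_cases hic : inb = true
              · -- the collecting case
                rw [show pvStepS (dA, some c, inb) l =
                    (dA.modify c [] (fun v => v ++ [l]), some c, inb) by
                  simp only [pvStepS, if_neg h1, if_neg h2, if_neg h3]
                  rw [if_pos ⟨hic, hcne, hp⟩]]
                rw [show pvPass2 (l :: rest) rev (pvMapF (pvPass1 (l :: rest) dA)) =
                    pvPass2 rest (l :: rev)
                      ((pvMapF (pvPass1 rest dA)).modify c []
                        (fun v => v ++ (PySem.Str.split₀ l).drop 1)) by
                  simp only [pvPass2, if_pos hp, ← hcap, hp1]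
                  rw [if_pos (hinb ▸ hic)]]
                rw [show (pvMapF (pvPass1 rest dA)).modify c []
                      (fun v => v ++ (PySem.Str.split₀ l).drop 1) =
                    pvMapF (pvPass1 rest (dA.modify c [] (fun v => v ++ [l]))) by
                  rw [pass1_modify_comm rest dA c _ hcon, ← modify_pvMapF _ _ _ hp]]
                exact ih (l :: rev) (dA.modify c [] (fun v => v ++ [l])) (some c) inb
                  (hcap.trans hcb.symm) (hinb.trans hicb.symm)
                  (by
                    intro c' hc'
                    injection hc' with hc'
                    rw [← hc', PySem.Dict.contains_modify]
                    simp [hcon])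
              · have hic' : inb = false := by simpa using hic
                rw [show pvStepS (dA, some c, inb) l = (dA, some c, inb) by
                  simp only [pvStepS, if_neg h1, if_neg h2, if_neg h3]
                  rw [if_neg (fun h => hic h.1)]]
                rw [hp1]
                rw [show pvPass2 (l :: rest) rev (pvMapF (pvPass1 rest dA)) =
                    pvPass2 rest (l :: rev) (pvMapF (pvPass1 rest dA)) by
                  simp only [pvPass2, if_pos hp, ← hcap]
                  rw [if_neg (by rw [← hinb, hic']; simp)]]
                exact ih (l :: rev) dA (some c) inb (hcap.trans hcb.symm)
                  (hinb.trans hicb.symm) hinv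
            · rw [show pvStepS (dA, some c, inb) l = (dA, some c, inb) by
                simp only [pvStepS, if_neg h1, if_neg h2, if_neg h3]
                rw [if_neg (fun h => hp h.2.2)]]
              rw [hp1]
              rw [show pvPass2 (l :: rest) rev (pvMapF (pvPass1 rest dA)) =
                  pvPass2 rest (l :: rev) (pvMapF (pvPass1 rest dA)) by
                simp only [pvPass2, if_neg hp]]
              exact ih (l :: rev) dA (some c) inb (hcap.trans hcb.symm)
                (hinb.trans hicb.symm) hinv

theorem templateTokens_eq (t : String) : pvTemplateTokens t = pvMapF (pvExtractA t) := by
  show pvPass2 ((PySem.Str.splitlines t).map PySem.Str.strip) []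
      (pvPass1 ((PySem.Str.splitlines t).map PySem.Str.strip) PySem.Dict.empty) =
    pvMapF (pvExtractA t)
  rw [show pvPass1 ((PySem.Str.splitlines t).map PySem.Str.strip) PySem.Dict.empty =
      pvMapF (pvPass1 ((PySem.Str.splitlines t).map PySem.Str.strip) PySem.Dict.empty) by
    rw [pvMapF_pass1]; rfl]
  rw [pass2_eq _ [] PySem.Dict.empty none false rfl rfl (by intro c hc; simp at hc)]
  show pvMapF ((((PySem.Str.splitlines t).map PySem.Str.strip).foldl pvStepS
      (PySem.Dict.empty, none, false)).1) =
    pvMapF (((PySem.Str.splitlines t).foldl pvStepA (PySem.Dict.empty, none, false)).1)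
  rw [List.foldl_map]
  rfl

-- the two final comparisons agree on any pair of Nodup-keyed dicts
theorem final_eq (da de : PySem.Dict String (List String))
    (ha : da.keys.Nodup) (he : de.keys.Nodup) :
    (if !(PySem.Set.equal (PySem.Set.ofList da.keys) (PySem.Set.ofList de.keys)) then false
     else de.keys.all (fun cap_id =>
       ((da.getD cap_id []).foldl (fun acc command => acc ++ pvCanonA command) []) ==
       ((de.getD cap_id []).foldl (fun acc command => acc ++ pvCanonA command) [])))
      = pvDictEqB (pvMapF da) (pvMapF de) := by
  have hka : (pvMapF da).keys = da.keys := keys_pvMapF da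
  have hke : (pvMapF de).keys = de.keys := keys_pvMapF de
  rw [Bool.eq_iff_iff]
  constructor
  · intro h
    by_cases hset : PySem.Set.equal (PySem.Set.ofList da.keys) (PySem.Set.ofList de.keys) = true
    · rw [if_neg (by simp [hset])] at h
      have hmem : ∀ k, k ∈ da.keys ↔ k ∈ de.keys := by
        intro k
        have := (PySem.Set.equal_iff _ _).mp hset k
        simpa [PySem.Set.mem_ofList] using this
      have hval : ∀ k, (pvMapF da).get? k = (pvMapF de).get? k := by
        intro k
        rw [get?_pvMapF, get?_pvMapF]
        cases hga : da.get? k with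
        | none =>
          have hk : k ∉ da.keys := (PySem.Dict.get?_eq_none_iff_not_mem_keys da k).mp hga
          have : de.get? k = none :=
            (PySem.Dict.get?_eq_none_iff_not_mem_keys de k).mpr (fun hm => hk ((hmem k).mpr hm))
          simp [this]
        | some v =>
          have hk : k ∈ da.keys := by
            by_contra hk
            rw [(PySem.Dict.get?_eq_none_iff_not_mem_keys da k).mpr hk] at hga
            simp at hga
          have hke' : k ∈ de.keys := (hmem k).mp hk
          obtain ⟨w, hgw⟩ : ∃ w, de.get? k = some w := by
            cases hg : de.get? k with
            | none => exact absurd ((PySem.Dict.get?_eq_none_iff_not_mem_keys de k).mp hg) (by simp [hke'])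
            | some w => exact ⟨w, rfl⟩
          have := (List.all_eq_true.mp h) k hke'
          rw [PySem.List.foldl_append_eq_flatMap, PySem.List.foldl_append_eq_flatMap] at this
          simp only [List.nil_append, beq_iff_eq] at this
          rw [PySem.Dict.getD_eq_get?_getD, PySem.Dict.getD_eq_get?_getD, hga, hgw] at this
          simp only [Option.getD_some] at this
          simp [hgw, pvFlat, this]
      have hlen : (pvMapF da).size = (pvMapF de).size := by
        have hperm : da.keys.Perm de.keys := (List.perm_ext_iff_of_nodup ha he).mpr hmem
        have hil : da.items.length = de.items.length := by
          simpa [PySem.Dict.keys] using hperm.length_eq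
        simp [PySem.Dict.size, pvMapF, hil]
      apply Bool.and_eq_true_iff.mpr
      refine ⟨by simpa using hlen, List.all_eq_true.mpr ?_⟩
      intro p hp
      have hnd' : (pvMapF da).keys.Nodup := by rw [hka]; exact ha
      have : (pvMapF da).get? p.1 = some p.2 :=
        PySem.Dict.get?_of_mem_items (pvMapF da) (by exact hp) hnd'
      rw [hval p.1] at this
      simp [this]
    · rw [if_pos (by simp [hset])] at h
      exact absurd h Bool.false_ne_true
  · intro h
    obtain ⟨hlen, hall⟩ := Bool.and_eq_true_iff.mp h
    have hlen' : da.keys.length = de.keys.length := by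
      have : (pvMapF da).size = (pvMapF de).size := by simpa using hlen
      simpa [PySem.Dict.size, PySem.Dict.keys, pvMapF] using this
    have hnda : (pvMapF da).keys.Nodup := by rw [hka]; exact ha
    have hsub : ∀ k, k ∈ da.keys → k ∈ de.keys := by
      intro k hk
      obtain ⟨v, hv⟩ : ∃ v, (pvMapF da).get? k = some v := by
        cases hg : (pvMapF da).get? k with
        | none =>
          exact absurd ((PySem.Dict.get?_eq_none_iff_not_mem_keys _ k).mp hg) (by simp [hka, hk])
        | some v => exact ⟨v, rfl⟩
      have hp : (k, v) ∈ (pvMapF da).items :=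
        ((PySem.Dict.get?_eq_some_iff_mem_items _ k v hnda).mp hv)
      have := (List.all_eq_true.mp hall) (k, v) hp
      simp only [beq_iff_eq] at this
      have : k ∈ (pvMapF de).keys := by
        by_contra hk'
        rw [(PySem.Dict.get?_eq_none_iff_not_mem_keys _ k).mpr hk'] at this
        simp at this
      rwa [hke] at this
    have hmem : ∀ k, k ∈ da.keys ↔ k ∈ de.keys := by
      have hsp : da.keys.Subperm de.keys := List.subperm_of_subset ha hsub
      have hperm : da.keys.Perm de.keys := hsp.perm_of_length_le (le_of_eq hlen'.symm)
      exact fun k => hperm.mem_iff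
    have hval : ∀ k, (pvMapF da).get? k = (pvMapF de).get? k := by
      intro k
      by_cases hk : k ∈ da.keys
      · obtain ⟨v, hv⟩ : ∃ v, (pvMapF da).get? k = some v := by
          cases hg : (pvMapF da).get? k with
          | none =>
            exact absurd ((PySem.Dict.get?_eq_none_iff_not_mem_keys _ k).mp hg) (by simp [hka, hk])
          | some v => exact ⟨v, rfl⟩
        have hp : (k, v) ∈ (pvMapF da).items :=
          ((PySem.Dict.get?_eq_some_iff_mem_items _ k v hnda).mp hv)
        have := (List.all_eq_true.mp hall) (k, v) hp
        simp only [beq_iff_eq] at this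
        rw [hv, this]
      · rw [(PySem.Dict.get?_eq_none_iff_not_mem_keys _ k).mpr (by rw [hka]; exact hk),
          (PySem.Dict.get?_eq_none_iff_not_mem_keys _ k).mpr
            (by rw [hke]; exact fun hm => hk ((hmem k).mpr hm))]
    rw [if_neg]
    · apply List.all_eq_true.mpr
      intro k hk
      have := hval k
      rw [get?_pvMapF, get?_pvMapF] at this
      rw [PySem.List.foldl_append_eq_flatMap, PySem.List.foldl_append_eq_flatMap]
      simp only [List.nil_append, beq_iff_eq]
      rw [PySem.Dict.getD_eq_get?_getD, PySem.Dict.getD_eq_get?_getD]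
      cases hga : da.get? k with
      | none =>
        have : de.get? k = none :=
          (PySem.Dict.get?_eq_none_iff_not_mem_keys de k).mpr
            (fun hm => ((PySem.Dict.get?_eq_none_iff_not_mem_keys da k).mp hga) ((hmem k).mpr hm))
        simp [this]
      | some v =>
        rw [hga] at this
        cases hge : de.get? k with
        | none => rw [hge] at this; simp at this
        | some w =>
          rw [hge] at this
          simp only [Option.map_some, Option.some.injEq] at this
          simpa [pvFlat] using this
    · simp only [Bool.not_eq_true', Bool.not_eq_false]
      exact (PySem.Set.equal_iff _ _).mpr (by intro x; simpa [PySem.Set.mem_ofList] using hmem x)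

-- ===== VERDICT (by name: the statement is the Claim_ definition above) =====
theorem autogen_command_semantics_match_py_spec : Claim_equal_autogen_command_semantics_match_py := by
  intro a e _
  show autogen_command_semantics_match_py a e = autogen_command_semantics_match_py_alt a e
  unfold autogen_command_semantics_match_py autogen_command_semantics_match_py_alt
  rw [templateTokens_eq, templateTokens_eq]
  exact final_eq (pvExtractA a) (pvExtractA e) (nodup_keys_extractA a) (nodup_keys_extractA e)
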